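-- pv_equiv track=rewrite | github.com/minghsuy/domain-scout | domain_scout/sources/ct_logs.py | _extract_org_from_subject
-- ===== SOURCE A (Python) =====
-- def _extract_org_from_subject(subject: str) -> str | None:
--     """Parse O=... from an X.509 subject string.
--
--     Handles quoted strings with commas and escaped characters.
--     """
--     parts: list[str] = []
--     current: list[str] = []
--     in_quote = False
--     escape = False
--
--     # Split by comma, respecting quotes
--     for char in subject:
--         if escape:
--             current.append(char)
--             escape = False
--         elif char == "\\":
--             current.append(char)
--             escape = True
--         elif char == '"':
--             in_quote = not in_quote
--             current.append(char)
--         elif char == "," and not in_quote: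
--             parts.append("".join(current).strip())
--             current = []
--         else:
--             current.append(char)
--     parts.append("".join(current).strip())
--
--     for part in parts:
--         # Split on first = (key=value)
--         idx = part.find("=")
--         if idx == -1:
--             continue
--
--         key = part[:idx].strip().upper()
--         val = part[idx + 1 :].strip()
--
--         if key == "O":
--             # If quoted
--             if val.startswith('"') and val.endswith('"'):
--                 inner = val[1:-1]
--                 # In quoted string, \" is literal ", \\ is literal \
--                 return inner.replace(r'\"', '"').replace(r"\\", "\\")
--
--             # Unquoted: unescape \, and \\
--             return val.replace(r"\,", ",").replace(r"\\", "\\")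
--
--     return None
-- ===== SOURCE B (Python) =====
-- def _extract_org_from_subject(subject):
--     """Positional scan: record the indices of the unquoted splitting commas by
--     jumping over escape pairs (i += 2), then examine each field as a slice."""
--     n = len(subject)
--     cuts = []
--     i = 0
--     in_quote = False
--     while i < n:
--         c = subject[i]
--         if c == "\\":
--             i += 2
--             continue
--         if c == '"':
--             in_quote = not in_quote
--         elif c == "," and not in_quote:
--             cuts.append(i)
--         i += 1
--     starts = [0] + [c + 1 for c in cuts]
--     ends = cuts + [n]
--     for a, b in zip(starts, ends):
--         field = subject[a:b].strip()
--         idx = field.find("=")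
--         if idx == -1:
--             continue
--         key = field[:idx].strip().upper()
--         val = field[idx + 1:].strip()
--         if key == "O":
--             if val.startswith('"') and val.endswith('"'):
--                 inner = val[1:-1]
--                 return inner.replace('\\"', '"').replace("\\\\", "\\")
--             return val.replace("\\,", ",").replace("\\\\", "\\")
--     return None
-- ===== Notes on version B (the rewrite author's own statement) =====
-- stated objective: alternative
-- what changed: B replaces A's character-by-character tokenizer (escape flag plus growing field buffers collected into a parts list) with a positional scan that jumps over escape pairs (i += 2, no escape flag, no buffers) and records only the indices of the unquoted splitting commas, then reads each field directly as a slice of the input between consecutive boundaries.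
import Mathlib
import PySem

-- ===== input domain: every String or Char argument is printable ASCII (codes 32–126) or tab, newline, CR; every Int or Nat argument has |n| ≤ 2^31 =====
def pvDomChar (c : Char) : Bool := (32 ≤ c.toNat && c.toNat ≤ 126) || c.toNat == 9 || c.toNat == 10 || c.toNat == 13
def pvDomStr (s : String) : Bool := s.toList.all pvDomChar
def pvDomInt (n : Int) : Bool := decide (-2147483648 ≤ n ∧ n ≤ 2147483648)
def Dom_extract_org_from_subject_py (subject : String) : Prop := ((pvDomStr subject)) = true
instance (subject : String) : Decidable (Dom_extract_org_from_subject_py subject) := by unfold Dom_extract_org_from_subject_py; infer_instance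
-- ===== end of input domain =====

-- B replaces A's escape-flag tokenizer that accumulates character buffers with a
-- positional scan (jumping i += 2 over escape pairs) that records comma indices and
-- then reads each field as a slice; equivalence of return values is proved on all inputs.

-- Field processing shared by both ports: both Pythons run exactly this code on a stripped field.
def pvField (part : List Char) : Option String :=
  let idx := PySem.Chars.find part ['=']
  if idx = -1 then none
  else
    let key := PySem.Chars.upper (PySem.Chars.strip (PySem.Chars.slice part none (some idx)))
    let val := PySem.Chars.strip (PySem.Chars.slice part (some (idx + 1)) none)
    if key = ['O'] then
      if PySem.Chars.startswith val ['"'] && PySem.Chars.endswith val ['"'] then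
        let inner := PySem.Chars.slice val (some 1) (some (-1))
        some (String.ofList (PySem.Chars.replace (PySem.Chars.replace inner ['\\', '"'] ['"']) ['\\', '\\'] ['\\']))
      else
        some (String.ofList (PySem.Chars.replace (PySem.Chars.replace val ['\\', ','] [',']) ['\\', '\\'] ['\\']))
    else none

-- ===== PORT A =====
-- Phase 1 of A: split into stripped parts at unquoted, unescaped commas (buffer accumulation).
def pvSplitA : List Char → List (List Char) → List Char → Bool → Bool → List (List Char)
  | [], parts, cur, _, _ => parts ++ [PySem.Chars.strip cur]
  | c :: cs, parts, cur, inq, esc =>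
    if esc then pvSplitA cs parts (cur ++ [c]) inq false
    else if c = '\\' then pvSplitA cs parts (cur ++ [c]) inq true
    else if c = '"' then pvSplitA cs parts (cur ++ [c]) (!inq) esc
    else if c = ',' ∧ inq = false then pvSplitA cs (parts ++ [PySem.Chars.strip cur]) [] inq esc
    else pvSplitA cs parts (cur ++ [c]) inq esc

-- Phase 2 of A: first part whose key is O.
def pvFindA : List (List Char) → Option String
  | [] => none
  | p :: rest =>
    match pvField p with
    | some v => some v
    | none => pvFindA rest

def extract_org_from_subject_py (subject : String) : Option String :=
  pvFindA (pvSplitA subject.toList [] [] false false)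

-- ===== PORT B =====
-- B phase 1: indices of the unquoted splitting commas; an escape pair is skipped by i + 2.
def pvScanB (l : List Char) (i : Nat) (inq : Bool) (acc : List Nat) : List Nat :=
  if h : i < l.length then
    let c := l[i]
    if c = '\\' then pvScanB l (i + 2) inq acc
    else if c = '"' then pvScanB l (i + 1) (!inq) acc
    else if c = ',' ∧ inq = false then pvScanB l (i + 1) inq (acc ++ [i])
    else pvScanB l (i + 1) inq acc
  else acc
termination_by l.length - i

-- B phase 2: each field is the slice subject[a:b] for consecutive boundaries (exact for 0 ≤ a ≤ b ≤ len).
def pvLoopB (l : List Char) : List (Nat × Nat) → Option String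
  | [] => none
  | (a, b) :: rest =>
    match pvField (PySem.Chars.strip ((l.drop a).take (b - a))) with
    | some v => some v
    | none => pvLoopB l rest

def extract_org_from_subject_py_alt (subject : String) : Option String :=
  pvLoopB subject.toList
    ((0 :: (pvScanB subject.toList 0 false []).map (· + 1)).zip
      (pvScanB subject.toList 0 false [] ++ [subject.toList.length]))

-- ===== PRECONDITION & SPEC =====
def Spec_extract_org_from_subject_py (subject : String) (out : Option String) : Prop := out = extract_org_from_subject_py_alt subject
instance (subject : String) (out : Option String) : Decidable (Spec_extract_org_from_subject_py subject out) := by unfold Spec_extract_org_from_subject_py; infer_instance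

-- ===== CLAIM (what is proved, stated in full; the proofs are below) =====
def Claim_equal_extract_org_from_subject_py : Prop := ∀ (subject : String), Dom_extract_org_from_subject_py subject → Spec_extract_org_from_subject_py subject (extract_org_from_subject_py subject)

-- ===== LEMMAS AND PROOFS =====

-- step lemmas for A's splitter
theorem pvSplitA_nil (parts : List (List Char)) (cur : List Char) (inq esc : Bool) :
    pvSplitA [] parts cur inq esc = parts ++ [PySem.Chars.strip cur] := rfl

theorem pvSplitA_esc (c : Char) (cs : List Char) (parts : List (List Char)) (cur : List Char) (inq : Bool) :
    pvSplitA (c :: cs) parts cur inq true = pvSplitA cs parts (cur ++ [c]) inq false := by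
  rw [pvSplitA]; simp

theorem pvSplitA_bs (cs : List Char) (parts : List (List Char)) (cur : List Char) (inq : Bool) :
    pvSplitA ('\\' :: cs) parts cur inq false = pvSplitA cs parts (cur ++ ['\\']) inq true := by
  rw [pvSplitA]; simp

theorem pvSplitA_quote (cs : List Char) (parts : List (List Char)) (cur : List Char) (inq : Bool) :
    pvSplitA ('"' :: cs) parts cur inq false = pvSplitA cs parts (cur ++ ['"']) (!inq) false := by
  rw [pvSplitA]; simp

theorem pvSplitA_comma (cs : List Char) (parts : List (List Char)) (cur : List Char) :
    pvSplitA (',' :: cs) parts cur false false = pvSplitA cs (parts ++ [PySem.Chars.strip cur]) [] false false := by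
  rw [pvSplitA]; simp

theorem pvSplitA_other (c : Char) (cs : List Char) (parts : List (List Char)) (cur : List Char) (inq : Bool)
    (h1 : ¬ c = '\\') (h2 : ¬ c = '"') (h3 : ¬ (c = ',' ∧ inq = false)) :
    pvSplitA (c :: cs) parts cur inq false = pvSplitA cs parts (cur ++ [c]) inq false := by
  rw [pvSplitA]; simp [h1, h2, h3]

-- step lemmas for B's scanner
theorem pvScanB_stop (l : List Char) (i : Nat) (inq : Bool) (acc : List Nat) (h : ¬ i < l.length) :
    pvScanB l i inq acc = acc := by
  rw [pvScanB]; simp [h]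

theorem pvScanB_bs (l : List Char) (i : Nat) (inq : Bool) (acc : List Nat) (h : i < l.length)
    (hc : l[i] = '\\') : pvScanB l i inq acc = pvScanB l (i + 2) inq acc := by
  rw [pvScanB]; simp [h, hc]

theorem pvScanB_quote (l : List Char) (i : Nat) (inq : Bool) (acc : List Nat) (h : i < l.length)
    (hc : l[i] = '"') : pvScanB l i inq acc = pvScanB l (i + 1) (!inq) acc := by
  rw [pvScanB]; simp [h, hc]

theorem pvScanB_comma (l : List Char) (i : Nat) (acc : List Nat) (h : i < l.length)
    (hc : l[i] = ',') : pvScanB l i false acc = pvScanB l (i + 1) false (acc ++ [i]) := by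
  rw [pvScanB]; simp [h, hc]

theorem pvScanB_other (l : List Char) (i : Nat) (inq : Bool) (acc : List Nat) (h : i < l.length)
    (h1 : ¬ l[i] = '\\') (h2 : ¬ l[i] = '"') (h3 : ¬ (l[i] = ',' ∧ inq = false)) :
    pvScanB l i inq acc = pvScanB l (i + 1) inq acc := by
  rw [pvScanB]; simp [h, h1, h2, h3]

theorem pvScanB_acc (l : List Char) : ∀ (fuel i : Nat) (inq : Bool) (acc : List Nat),
    l.length - i ≤ fuel → pvScanB l i inq acc = acc ++ pvScanB l i inq [] := by
  intro fuel
  induction fuel with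
  | zero =>
    intro i inq acc h
    have hn : ¬ i < l.length := by omega
    rw [pvScanB_stop l i inq acc hn, pvScanB_stop l i inq [] hn]
    simp
  | succ f ih =>
    intro i inq acc h
    by_cases hi : i < l.length
    · by_cases h1 : l[i] = '\\'
      · rw [pvScanB_bs l i inq acc hi h1, pvScanB_bs l i inq [] hi h1]
        exact ih (i + 2) inq acc (by omega)
      · by_cases h2 : l[i] = '"'
        · rw [pvScanB_quote l i inq acc hi h2, pvScanB_quote l i inq [] hi h2]
          exact ih (i + 1) (!inq) acc (by omega)
        · by_cases h3 : l[i] = ',' ∧ inq = false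
          · obtain ⟨hc, hq⟩ := h3
            subst hq
            rw [pvScanB_comma l i acc hi hc, pvScanB_comma l i [] hi hc]
            rw [ih (i + 1) false (acc ++ [i]) (by omega), ih (i + 1) false ([] ++ [i]) (by omega)]
            simp
          · rw [pvScanB_other l i inq acc hi h1 h2 h3, pvScanB_other l i inq [] hi h1 h2 h3]
            exact ih (i + 1) inq acc (by omega)
    · rw [pvScanB_stop l i inq acc hi, pvScanB_stop l i inq [] hi]; simp

-- first-hit scans as Option.or
theorem pvFindA_cons (p : List Char) (rest : List (List Char)) :
    pvFindA (p :: rest) = (pvField p).or (pvFindA rest) := by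
  cases h : pvField p <;> simp [pvFindA, h, Option.or]

theorem pvFindA_append (xs ys : List (List Char)) :
    pvFindA (xs ++ ys) = (pvFindA xs).or (pvFindA ys) := by
  induction xs with
  | nil => simp [pvFindA, Option.or]
  | cons p rest ih => simp [pvFindA_cons, ih, Option.or_assoc]

theorem pvLoopB_cons (l : List Char) (a b : Nat) (rest : List (Nat × Nat)) :
    pvLoopB l ((a, b) :: rest)
      = (pvField (PySem.Chars.strip ((l.drop a).take (b - a)))).or (pvLoopB l rest) := by
  cases h : pvField (PySem.Chars.strip ((l.drop a).take (b - a))) <;> simp [pvLoopB, h, Option.or]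

theorem pvFindA_single (p : List Char) : pvFindA [p] = pvField p := by
  cases h : pvField p <;> simp [pvFindA, h]

theorem pvLoopB_single (l : List Char) (a b : Nat) :
    pvLoopB l [(a, b)] = pvField (PySem.Chars.strip ((l.drop a).take (b - a))) := by
  cases h : pvField (PySem.Chars.strip ((l.drop a).take (b - a))) <;> simp [pvLoopB, h]

-- (start, cuts, n) as the list of (start, end) pairs B's zip builds
def pvPairs (n : Nat) : Nat → List Nat → List (Nat × Nat)
  | s, [] => [(s, n)]
  | s, c :: cs => (s, c) :: pvPairs n (c + 1) cs

theorem pvZip_eq_pairs (n : Nat) : ∀ (cuts : List Nat) (s : Nat),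
    (s :: cuts.map (· + 1)).zip (cuts ++ [n]) = pvPairs n s cuts := by
  intro cuts
  induction cuts with
  | nil => intro s; simp [pvPairs]
  | cons c cs ih => intro s; simp [pvPairs, ih (c + 1)]

-- the buffer A has accumulated is a slice of the input
theorem pvSeg_extend (l : List Char) (s i : Nat) (hs : s ≤ i) (hi : i < l.length) :
    (l.drop s).take (i - s) ++ [l[i]] = (l.drop s).take (i + 1 - s) := by
  have h1 : i - s < (l.drop s).length := by simp; omega
  have h2 : (l.drop s)[i - s]'h1 = l[i] := by
    rw [List.getElem_drop]; congr 1; omega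
  rw [← h2, ← List.concat_eq_append, List.take_concat_get]
  congr 1; omega

-- main invariant: from position i with current field begun at s, A's remaining run equals B's
theorem pvMain (l : List Char) : ∀ (fuel i s : Nat) (inq : Bool) (parts : List (List Char)),
    l.length - i ≤ fuel → s ≤ i → i ≤ l.length →
    pvFindA (pvSplitA (l.drop i) parts ((l.drop s).take (i - s)) inq false)
      = (pvFindA parts).or (pvLoopB l (pvPairs l.length s (pvScanB l i inq []))) := by
  intro fuel
  induction fuel with
  | zero =>
    intro i s inq parts hf hs hi
    have hn : i = l.length := by omega
    subst hn
    rw [List.drop_length, pvSplitA_nil, pvFindA_append,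
      pvScanB_stop l l.length inq [] (by omega)]
    simp only [pvPairs]
    rw [pvFindA_single, pvLoopB_single]
  | succ f ih =>
    intro i s inq parts hf hs hi
    by_cases hlt : i < l.length
    · have hdrop : l.drop i = l[i] :: l.drop (i + 1) := List.drop_eq_getElem_cons hlt
      by_cases h1 : l[i] = '\\'
      · rw [pvScanB_bs l i inq [] hlt h1, hdrop, h1, pvSplitA_bs]
        rw [show ['\\'] = [l[i]] by rw [h1], pvSeg_extend l s i hs hlt]
        by_cases hlt2 : i + 1 < l.length
        · have hdrop2 : l.drop (i + 1) = l[i + 1] :: l.drop (i + 2) :=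
            List.drop_eq_getElem_cons hlt2
          rw [hdrop2, pvSplitA_esc, pvSeg_extend l s (i + 1) (by omega) hlt2]
          exact ih (i + 2) s inq parts (by omega) (by omega) (by omega)
        · -- backslash is the last character of the input
          have hnil : l.drop (i + 1) = [] := by
            have : i + 1 = l.length := by omega
            rw [this, List.drop_length]
          rw [hnil, pvSplitA_nil, pvFindA_append,
            pvScanB_stop l (i + 2) inq [] (by omega)]
          have hseg : i + 1 - s = l.length - s := by omega
          rw [hseg]
          simp only [pvPairs]
          rw [pvFindA_single, pvLoopB_single]
      · by_cases h2 : l[i] = '"'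
        · rw [pvScanB_quote l i inq [] hlt h2, hdrop, h2, pvSplitA_quote]
          rw [show ['"'] = [l[i]] by rw [h2], pvSeg_extend l s i hs hlt]
          exact ih (i + 1) s (!inq) parts (by omega) (by omega) (by omega)
        · by_cases h3 : l[i] = ',' ∧ inq = false
          · obtain ⟨hc, hq⟩ := h3
            subst hq
            rw [pvScanB_comma l i [] hlt hc, hdrop, hc, pvSplitA_comma]
            simp only [List.nil_append]
            rw [pvScanB_acc l (l.length - (i + 1)) (i + 1) false [i] (by omega)]
            have hstep := ih (i + 1) (i + 1) false
              (parts ++ [PySem.Chars.strip ((l.drop s).take (i - s))]) (by omega) (by omega) (by omega)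
            simp only [Nat.sub_self, List.take_zero] at hstep
            rw [hstep, pvFindA_append]
            have hpairs : pvPairs l.length s ([i] ++ pvScanB l (i + 1) false [])
                = (s, i) :: pvPairs l.length (i + 1) (pvScanB l (i + 1) false []) := rfl
            rw [hpairs, pvLoopB_cons, pvFindA_single, Option.or_assoc]
          · rw [pvScanB_other l i inq [] hlt h1 h2 h3, hdrop, pvSplitA_other _ _ _ _ _ h1 h2 h3,
              pvSeg_extend l s i hs hlt]
            exact ih (i + 1) s inq parts (by omega) (by omega) (by omega)
    · have hn : i = l.length := by omega
      subst hn
      rw [List.drop_length, pvSplitA_nil, pvFindA_append, pvScanB_stop l l.length inq [] hlt]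
      simp only [pvPairs]
      rw [pvFindA_single, pvLoopB_single]

-- ===== VERDICT (by name: the statement is the Claim_ definition above) =====
theorem extract_org_from_subject_py_spec : Claim_equal_extract_org_from_subject_py := by
  intro subject _
  unfold Spec_extract_org_from_subject_py extract_org_from_subject_py extract_org_from_subject_py_alt
  rw [pvZip_eq_pairs]
  have := pvMain subject.toList (subject.toList.length) 0 0 false [] (by omega) (by omega) (by omega)
  simp only [List.drop_zero, Nat.sub_zero, List.take_zero] at this
  rw [this]
  simp [pvFindA, Option.or]
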